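-- pv_equiv track=rewrite | github.com/gaurav104/Image-Text-Matching | src/data_preprocess/preprocess_bert.py | cap2tokens
-- ===== SOURCE A (Python) =====
-- import string
--
-- def cap2tokens(cap):
-- 	exclude = set(string.punctuation)
-- 	caption=[]
-- 	for i in cap:
-- 		if i not in exclude:
-- 			caption.append(i)
-- 		else:
-- 			caption.append(' ')
-- 	caption = ''.join(caption)
--
-- 	tokens = caption.lower().split()
--
-- 	return tokens
-- ===== SOURCE B (Python) =====
-- import string
--
-- def cap2tokens(cap):
--     tokens = []
--     cur = []
--     for ch in cap.lower():
--         if ch in string.punctuation or ch.isspace():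
--             if cur:
--                 tokens.append(''.join(cur))
--                 cur = []
--         else:
--             cur.append(ch)
--     if cur:
--         tokens.append(''.join(cur))
--     return tokens
-- ===== Notes on version B (the rewrite author's own statement) =====
-- stated objective: alternative
-- what changed: Replaces A's build-a-punctuation-blanked-copy-of-the-string-then-lower-then-split pipeline with a single pass over the lowercased characters that accumulates the current word directly and flushes it at each punctuation/whitespace character, never materialising an intermediate string.
import Mathlib
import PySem

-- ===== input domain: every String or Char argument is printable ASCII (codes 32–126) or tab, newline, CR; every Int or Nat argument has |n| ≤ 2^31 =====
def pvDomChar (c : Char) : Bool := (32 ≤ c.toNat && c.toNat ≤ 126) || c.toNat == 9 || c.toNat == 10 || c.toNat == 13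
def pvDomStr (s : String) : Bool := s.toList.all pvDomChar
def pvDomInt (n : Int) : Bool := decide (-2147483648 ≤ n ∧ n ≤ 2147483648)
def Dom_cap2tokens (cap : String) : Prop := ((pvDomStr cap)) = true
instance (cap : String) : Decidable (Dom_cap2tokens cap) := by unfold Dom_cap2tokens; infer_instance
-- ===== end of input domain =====

-- B replaces A's blank-out-punctuation / lower / split pipeline with a single pass over the
-- lowercased characters that accumulates the current word and flushes it at each punctuation
-- or whitespace character (objective: alternative, same linear cost).

-- string.punctuation
def pvPunct : List Char := "!\"#$%&'()*+,-./:;<=>?@[\\]^_`{|}~".toList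

-- ===== PORT A =====
def cap2tokens (cap : String) : List String :=
  let exclude : PySem.Set Char := PySem.Set.ofList pvPunct
  let caption : List Char :=
    cap.toList.foldl
      (fun acc i => if ¬ (exclude.contains i) then acc ++ [i] else acc ++ [' ']) []
  PySem.Str.split₀ (PySem.Str.lower (String.ofList caption))

-- ===== PORT B =====
-- loop body of B's single pass (state: tokens so far, current word)
def pvStepB (st : List String × List Char) (ch : Char) : List String × List Char :=
  if pvPunct.contains ch || PySem.Str.isspace ch then
    (if st.2.isEmpty then st else (st.1 ++ [String.ofList st.2], []))
  else (st.1, st.2 ++ [ch])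

def cap2tokens_alt (cap : String) : List String :=
  let r := (PySem.Str.lower cap).toList.foldl pvStepB ([], [])
  if r.2.isEmpty then r.1 else r.1 ++ [String.ofList r.2]

-- ===== PRECONDITION & SPEC =====
def Spec_cap2tokens (cap : String) (out : List String) : Prop := out = cap2tokens_alt cap
instance (cap : String) (out : List String) : Decidable (Spec_cap2tokens cap out) := by unfold Spec_cap2tokens; infer_instance

-- ===== CLAIM (what is proved, stated in full; the proofs are below) =====
def Claim_equal_cap2tokens : Prop := ∀ (cap : String), Dom_cap2tokens cap → Spec_cap2tokens cap (cap2tokens cap)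

-- ===== LEMMAS AND PROOFS =====

-- the substitution A applies before splitting
def pvSubst (c : Char) : Char := if pvPunct.contains c then ' ' else c

-- char-list-level version of B's loop body, and the final flush
def pvStepL (st : List (List Char) × List Char) (ch : Char) : List (List Char) × List Char :=
  if pvPunct.contains ch || PySem.Str.isspace ch then
    (if st.2.isEmpty then st else (st.1 ++ [st.2], []))
  else (st.1, st.2 ++ [ch])

def pvFinish (r : List (List Char) × List Char) : List (List Char) :=
  if r.2.isEmpty then r.1 else r.1 ++ [r.2]

-- punctuation characters are neither uppercase nor lowercase letters (checked by evaluation)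
theorem pvPunct_bounds : ∀ c ∈ pvPunct,
    (c.toNat < 65 ∨ 90 < c.toNat) ∧ (c.toNat < 97 ∨ 122 < c.toNat) := by
  have h : pvPunct.all (fun c =>
      (decide (c.toNat < 65) || decide (90 < c.toNat)) &&
      (decide (c.toNat < 97) || decide (122 < c.toNat))) = true := by rfl
  intro c hc
  have := List.all_eq_true.mp h c hc
  simpa using this

theorem pvIsupper_toNat {c : Char} (h : PySem.Chars.isupper c = true) :
    65 ≤ c.toNat ∧ c.toNat ≤ 90 := by
  simp only [PySem.Chars.isupper, Bool.and_eq_true, decide_eq_true_eq] at h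
  exact ⟨h.1, h.2⟩

-- lowercasing commutes with blanking punctuation (lowerChar only moves 'A'-'Z', never punctuation)
theorem pvLower_subst (c : Char) :
    PySem.Chars.lowerChar (pvSubst c) = pvSubst (PySem.Chars.lowerChar c) := by
  by_cases hp : pvPunct.contains c = true
  · have hm : c ∈ pvPunct := by simpa using hp
    have hnu : PySem.Chars.isupper c = false := by
      by_contra h
      have hu := pvIsupper_toNat (by simpa using h)
      have := (pvPunct_bounds c hm).1
      omega
    have h1 : pvSubst c = ' ' := by simp [pvSubst, hm]
    have h2 : PySem.Chars.lowerChar c = c := by simp [PySem.Chars.lowerChar, hnu]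
    rw [h1, h2, h1]
    decide
  · have hm : c ∉ pvPunct := by simpa using hp
    have h1 : pvSubst c = c := by simp [pvSubst, hm]
    rw [h1]
    by_cases hu : PySem.Chars.isupper c = true
    · have hb := pvIsupper_toNat hu
      have hlc : PySem.Chars.lowerChar c = Char.ofNat (c.toNat + 32) := by
        simp [PySem.Chars.lowerChar, hu]
      have htn : (Char.ofNat (c.toNat + 32)).toNat = c.toNat + 32 := by
        have hv : (c.toNat + 32).isValidChar := Or.inl (by omega)
        rw [Char.toNat_ofNat, if_pos hv]
      have hnm : PySem.Chars.lowerChar c ∉ pvPunct := by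
        rw [hlc]
        intro hmem
        have := (pvPunct_bounds _ hmem).2
        omega
      simp [pvSubst, hnm]
    · have h2 : PySem.Chars.lowerChar c = c := by
        simp [PySem.Chars.lowerChar]
        intro h; exact absurd h hu
      rw [h2]
      simp [pvSubst, hm]

-- blanking punctuation turns "punctuation or whitespace" into plain whitespace
theorem pvIsspace_subst (c : Char) :
    PySem.Chars.isspace (pvSubst c) = (pvPunct.contains c || PySem.Str.isspace c) := by
  by_cases hp : pvPunct.contains c = true
  · have hm : c ∈ pvPunct := by simpa using hp
    simp [pvSubst, hm]
    decide
  · have hm : c ∉ pvPunct := by simpa using hp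
    simp [pvSubst, hm, PySem.Str.isspace]

-- step-function evaluation lemmas
theorem pvStepL_delim_nil {ch : Char} (h : (pvPunct.contains ch || PySem.Str.isspace ch) = true)
    (toks : List (List Char)) : pvStepL (toks, []) ch = (toks, []) := by
  unfold pvStepL
  rw [if_pos h]
  rfl

theorem pvStepL_delim_cons {ch : Char} (h : (pvPunct.contains ch || PySem.Str.isspace ch) = true)
    (toks : List (List Char)) {cur : List Char} (hc : cur ≠ []) :
    pvStepL (toks, cur) ch = (toks ++ [cur], []) := by
  unfold pvStepL
  rw [if_pos h, if_neg (by simpa using hc)]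

theorem pvStepL_word {ch : Char} (h : (pvPunct.contains ch || PySem.Str.isspace ch) = false)
    (toks : List (List Char)) (cur : List Char) :
    pvStepL (toks, cur) ch = (toks, cur ++ [ch]) := by
  unfold pvStepL
  rw [if_neg (fun hcon => by rw [h] at hcon; exact Bool.false_ne_true hcon)]

-- split₀.go equations
theorem pvGo_nil (cur : List Char) (accs : List (List Char)) :
    PySem.Chars.split₀.go [] cur accs =
      if cur.isEmpty then accs.reverse else (cur.reverse :: accs).reverse := by
  simp [PySem.Chars.split₀.go]

theorem pvGo_space {c : Char} (h : PySem.Chars.isspace c = true) (rest cur : List Char)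
    (accs : List (List Char)) :
    PySem.Chars.split₀.go (c :: rest) cur accs =
      if cur.isEmpty then PySem.Chars.split₀.go rest [] accs
      else PySem.Chars.split₀.go rest [] (cur.reverse :: accs) := by
  simp [PySem.Chars.split₀.go, h]

theorem pvGo_word {c : Char} (h : PySem.Chars.isspace c = false) (rest cur : List Char)
    (accs : List (List Char)) :
    PySem.Chars.split₀.go (c :: rest) cur accs = PySem.Chars.split₀.go rest (c :: cur) accs := by
  simp [PySem.Chars.split₀.go, h]

-- main simulation: A's split₀.go over the substituted list IS B's flush-fold
theorem pvGo_eq_fold (m : List Char) (cur : List Char) (accs : List (List Char)) :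
    PySem.Chars.split₀.go (m.map pvSubst) cur accs =
      pvFinish (m.foldl pvStepL (accs.reverse, cur.reverse)) := by
  induction m generalizing cur accs with
  | nil =>
    rw [List.map_nil, List.foldl_nil, pvGo_nil]
    by_cases h : cur = []
    · simp [pvFinish, h]
    · simp [pvFinish, h]
  | cons c rest ih =>
    rw [List.map_cons, List.foldl_cons]
    by_cases hd : (pvPunct.contains c || PySem.Str.isspace c) = true
    · have hs : PySem.Chars.isspace (pvSubst c) = true := by rw [pvIsspace_subst]; exact hd
      rw [pvGo_space hs]
      by_cases h : cur = []
      · subst h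
        simp only [List.isEmpty_nil, List.reverse_nil, if_true]
        rw [pvStepL_delim_nil hd]
        have := ih [] accs
        simpa using this
      · rw [if_neg (by simpa using h),
            pvStepL_delim_cons hd accs.reverse (by simpa using h)]
        have := ih [] (cur.reverse :: accs)
        simpa using this
    · have hd' : (pvPunct.contains c || PySem.Str.isspace c) = false := by
        simpa using hd
      have hnp : c ∉ pvPunct := by
        simp only [Bool.or_eq_false_iff] at hd'
        simpa using hd'.1
      have hsub : pvSubst c = c := by simp [pvSubst, hnp]
      have hs : PySem.Chars.isspace (pvSubst c) = false := by rw [pvIsspace_subst]; exact hd'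
      rw [hsub] at hs
      rw [hsub, pvGo_word hs, pvStepL_word hd']
      have := ih (c :: cur) accs
      simpa [hsub] using this

-- B's String-building fold simulates the char-list-level fold
theorem pvFoldB_eq (m : List Char) (accs : List (List Char)) (cur : List Char) :
    m.foldl pvStepB (accs.map String.ofList, cur)
      = ((m.foldl pvStepL (accs, cur)).1.map String.ofList, (m.foldl pvStepL (accs, cur)).2) := by
  induction m generalizing accs cur with
  | nil => simp
  | cons c rest ih =>
    rw [List.foldl_cons, List.foldl_cons]
    by_cases hd : (pvPunct.contains c || PySem.Str.isspace c) = true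
    · by_cases h : cur = []
      · subst h
        rw [show pvStepB (accs.map String.ofList, []) c = (accs.map String.ofList, []) by
              unfold pvStepB; rw [if_pos hd]; rfl,
            pvStepL_delim_nil hd]
        exact ih accs []
      · rw [show pvStepB (accs.map String.ofList, cur) c
              = (accs.map String.ofList ++ [String.ofList cur], []) by
              unfold pvStepB; rw [if_pos hd, if_neg (by simpa using h)],
            pvStepL_delim_cons hd accs h]
        have := ih (accs ++ [cur]) []
        simpa using this
    · rw [show pvStepB (accs.map String.ofList, cur) c = (accs.map String.ofList, cur ++ [c]) by
            unfold pvStepB; rw [if_neg hd],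
          pvStepL_word (by simpa using hd)]
      exact ih accs (cur ++ [c])

theorem pvSplit₀_eq (s : String) :
    PySem.Str.split₀ s = (PySem.Chars.split₀ s.toList).map String.ofList := by
  rw [← PySem.Str.split₀_map_toList, List.map_map]
  simp [Function.comp_def]

set_option maxRecDepth 2048 in
theorem pvSet_punct : (PySem.Set.ofList pvPunct : List Char) = pvPunct := by decide

set_option maxHeartbeats 1000000 in
theorem cap2tokens_eq_alt (cap : String) : cap2tokens cap = cap2tokens_alt cap := by
  simp only [cap2tokens, cap2tokens_alt]
  have hfun : (fun (acc : List Char) (i : Char) =>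
        if ¬ ((PySem.Set.ofList pvPunct : PySem.Set Char).contains i = true) then acc ++ [i]
        else acc ++ [' '])
      = (fun acc i => acc ++ [pvSubst i]) := by
    funext acc i
    have hc : (PySem.Set.ofList pvPunct : PySem.Set Char).contains i = pvPunct.contains i := by
      rw [pvSet_punct]; rfl
    rw [hc]
    by_cases h : pvPunct.contains i = true
    · rw [if_neg (fun hcon => hcon h), show pvSubst i = ' ' by unfold pvSubst; rw [if_pos h]]
    · rw [if_pos h,
          show pvSubst i = i by unfold pvSubst; rw [if_neg h]]
  rw [hfun, PySem.List.foldl_append_singleton_eq_map pvSubst cap.toList []]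
  rw [List.nil_append]
  -- move everything to the char-list level
  have harg : (PySem.Str.lower (String.ofList (cap.toList.map pvSubst))).toList
      = (cap.toList.map PySem.Chars.lowerChar).map pvSubst := by
    rw [PySem.Str.toList_lower,
        show (String.ofList (cap.toList.map pvSubst)).toList = cap.toList.map pvSubst by simp,
        PySem.Chars.lower, List.map_map, List.map_map]
    congr 1
    funext c
    exact pvLower_subst c
  have hA := pvSplit₀_eq (PySem.Str.lower (String.ofList (cap.toList.map pvSubst)))
  rw [harg] at hA
  rw [hA,
      show PySem.Chars.split₀ ((cap.toList.map PySem.Chars.lowerChar).map pvSubst)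
        = PySem.Chars.split₀.go ((cap.toList.map PySem.Chars.lowerChar).map pvSubst) [] [] from rfl,
      pvGo_eq_fold (cap.toList.map PySem.Chars.lowerChar) [] []]
  have hM : (PySem.Str.lower cap).toList = cap.toList.map PySem.Chars.lowerChar := by
    simp [PySem.Chars.lower]
  rw [hM]
  have hB := pvFoldB_eq (cap.toList.map PySem.Chars.lowerChar) [] []
  rw [show (([] : List (List Char)).map String.ofList) = ([] : List String) from rfl] at hB
  rw [hB]
  rw [show (([] : List (List Char)).reverse) = ([] : List (List Char)) from rfl,
      show (([] : List Char).reverse) = ([] : List Char) from rfl]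
  set F := (cap.toList.map PySem.Chars.lowerChar).foldl pvStepL ([], []) with hF
  by_cases h : F.2 = []
  · simp [pvFinish, h]
  · simp [pvFinish, h]

-- ===== VERDICT (by name: the statement is the Claim_ definition above) =====
theorem cap2tokens_spec : Claim_equal_cap2tokens := by
  intro cap _
  unfold Spec_cap2tokens
  exact cap2tokens_eq_alt cap
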